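-- pv_equiv track=rewrite | github.com/jgonsior/german_ir_nlp_demo | communication/latex-files/inverted_index_latex/inverted_index.py | abbreviate_sections
-- ===== SOURCE A (Python) =====
-- def abbreviate_sections(sections):
--     """
--     Abbreviates consecutive section numbers.
--
--     Args:
--     - sections (list): List of section numbers to abbreviate.
--
--     Returns:
--     - str: Abbreviated section numbers as a string.
--     """
--     if not sections:
--         return ""
--
--     sections = sorted(sections)
--     ranges = []
--     range_start = sections[0]
--     previous = sections[0]
--
--     # Determine consecutive ranges
--     for section in sections[1:]:
--         if section == previous + 1:
--             previous = section
--         else: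
--             if range_start == previous:
--                 ranges.append(f'{range_start}')
--             else:
--                 ranges.append(f'{range_start}-{previous}')
--             range_start = section
--             previous = section
--
--     # Add last range
--     if range_start == previous:
--         ranges.append(f'{range_start}')
--     else:
--         ranges.append(f'{range_start}-{previous}')
--
--     return ', '.join(ranges)
-- ===== SOURCE B (Python) =====
-- def abbreviate_sections(sections):
--     """Abbreviates consecutive section numbers via boundary detection:
--     the run-start list and run-end list are computed independently from
--     adjacent pairs of the sorted list, then zipped into labels."""
--     s = sorted(sections)
--     if not s:
--         return ""
--     pairs = list(zip(s, s[1:]))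
--     starts = [s[0]] + [b for a, b in pairs if b != a + 1]
--     ends = [a for a, b in pairs if b != a + 1] + [s[-1]]
--     return ', '.join(f'{lo}' if lo == hi else f'{lo}-{hi}' for lo, hi in zip(starts, ends))
-- ===== Notes on version B (the rewrite author's own statement) =====
-- stated objective: alternative
-- what changed: Replaces A's stateful single-pass range_start/previous state machine (with its duplicated final flush) by boundary detection: zips the sorted list with its own tail, derives the run-start list and run-end list independently from the break pairs, and zips those two lists into the labels.
import Mathlib
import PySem

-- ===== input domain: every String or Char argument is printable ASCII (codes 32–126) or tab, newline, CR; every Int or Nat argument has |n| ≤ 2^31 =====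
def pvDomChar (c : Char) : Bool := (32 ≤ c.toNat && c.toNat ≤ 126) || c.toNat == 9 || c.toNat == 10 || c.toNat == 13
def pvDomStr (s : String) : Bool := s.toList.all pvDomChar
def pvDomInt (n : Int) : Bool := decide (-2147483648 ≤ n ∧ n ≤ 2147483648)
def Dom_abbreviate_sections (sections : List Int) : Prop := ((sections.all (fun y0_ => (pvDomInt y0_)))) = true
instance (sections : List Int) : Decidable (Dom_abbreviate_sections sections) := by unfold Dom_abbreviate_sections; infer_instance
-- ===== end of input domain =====

-- B replaces A's stateful run-tracking scan (range_start/previous accumulator with a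
-- duplicated final flush) by boundary detection: the run-start and run-end lists are
-- computed independently from adjacent pairs of the sorted list and zipped into labels
-- ("alternative" objective; same asymptotic cost).

-- ===== PORT A =====
-- A's f-strings: '{range_start}' or '{range_start}-{previous}'
def pvLabelA (range_start previous : Int) : String :=
  if range_start = previous then PySem.Int.toStr range_start
  else PySem.Int.toStr range_start ++ "-" ++ PySem.Int.toStr previous

-- A's loop body over sections[1:], state = (ranges, range_start, previous)
def pvStepA (acc : List String × Int × Int) (section_ : Int) : List String × Int × Int :=
  match acc with
  | (ranges, range_start, previous) =>
    if section_ = previous + 1 then (ranges, range_start, section_)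
    else (ranges ++ [pvLabelA range_start previous], section_, section_)

def abbreviate_sections (sections : List Int) : String :=
  if sections = [] then ""
  else
    match PySem.List.sorted sections (fun x => x) false with
    | [] => ""  -- unreachable: sorted of a nonempty list is nonempty
    | s0 :: rest =>
      let st := rest.foldl pvStepA ([], s0, s0)
      PySem.Str.join ", " (st.1 ++ [pvLabelA st.2.1 st.2.2])

-- ===== PORT B =====
-- B's f-strings: '{lo}' or '{lo}-{hi}'
def pvLabelB (lo hi : Int) : String :=
  if lo = hi then PySem.Int.toStr lo
  else PySem.Int.toStr lo ++ "-" ++ PySem.Int.toStr hi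

-- Source B: pairs = zip(s, s[1:]); starts/ends from the break pairs; s[1:] of x::rest is rest,
-- s[0] is x, s[-1] is getLast (the empty case returned '' above, so both are in range)
def abbreviate_sections_alt (sections : List Int) : String :=
  match PySem.List.sorted sections (fun x => x) false with
  | [] => ""
  | x :: rest =>
    let pairs := (x :: rest).zip rest
    let brks := pairs.filter (fun p => p.2 != p.1 + 1)
    let starts := [x] ++ brks.map (fun p => p.2)
    let ends := brks.map (fun p => p.1) ++ [(x :: rest).getLast (List.cons_ne_nil x rest)]
    PySem.Str.join ", " ((starts.zip ends).map (fun p => pvLabelB p.1 p.2))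

-- ===== PRECONDITION & SPEC =====
def Spec_abbreviate_sections (sections : List Int) (out : String) : Prop := out = abbreviate_sections_alt sections
instance (sections : List Int) (out : String) : Decidable (Spec_abbreviate_sections sections out) := by unfold Spec_abbreviate_sections; infer_instance

-- ===== CLAIM (what is proved, stated in full; the proofs are below) =====
def Claim_equal_abbreviate_sections : Prop := ∀ (sections : List Int), Dom_abbreviate_sections sections → Spec_abbreviate_sections sections (abbreviate_sections sections)

-- ===== LEMMAS AND PROOFS =====

-- common spec: the label list, as structural recursion on the remaining input
def pvGA (start prev : Int) (xs : List Int) : List String :=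
  match xs with
  | [] => [pvLabelA start prev]
  | x :: rest =>
    if x = prev + 1 then pvGA start x rest
    else pvLabelA start prev :: pvGA x x rest

-- A's fold produces pvGA
theorem pvFoldA_eq_pvGA (xs : List Int) (ranges : List String) (start prev : Int) :
    (xs.foldl pvStepA (ranges, start, prev)).1
      ++ [pvLabelA (xs.foldl pvStepA (ranges, start, prev)).2.1
                   (xs.foldl pvStepA (ranges, start, prev)).2.2]
      = ranges ++ pvGA start prev xs := by
  induction xs generalizing ranges start prev with
  | nil => simp [pvGA]
  | cons x rest ih =>
    simp only [List.foldl_cons, pvStepA, pvGA]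
    split
    · exact ih ranges start x
    · rw [ih (ranges ++ [pvLabelA start prev]) x x]
      simp

-- B's zipped starts/ends expression, parametrised by the pending run (start, prev)
def pvE (start prev : Int) (rest : List Int) : List String :=
  ((start :: (((prev :: rest).zip rest).filter (fun p => p.2 != p.1 + 1)).map (fun p => p.2)).zip
    ((((prev :: rest).zip rest).filter (fun p => p.2 != p.1 + 1)).map (fun p => p.1)
      ++ [(prev :: rest).getLast (List.cons_ne_nil prev rest)])).map
    (fun p => pvLabelB p.1 p.2)

-- B's expression also produces pvGA
theorem pvE_eq_pvGA (rest : List Int) (start prev : Int) :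
    pvE start prev rest = pvGA start prev rest := by
  induction rest generalizing start prev with
  | nil => simp [pvE, pvGA, pvLabelA, pvLabelB]
  | cons y r ih =>
    by_cases h : y = prev + 1
    · have : pvE start prev (y :: r) = pvE start y r := by
        simp [pvE, List.getLast_cons, h]
      rw [this, ih, pvGA, if_pos h]
    · have : pvE start prev (y :: r) = pvLabelA start prev :: pvE y y r := by
        simp [pvE, List.getLast_cons, h, pvLabelA, pvLabelB]
      rw [this, ih, pvGA, if_neg h]

theorem pvSorted_ne_nil {sections : List Int} (h : sections ≠ []) :
    PySem.List.sorted sections (fun x => x) false ≠ [] := by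
  intro hnil
  have hp := PySem.List.sorted_perm sections (fun x => x) false
  rw [hnil] at hp
  exact h hp.symm.eq_nil

-- ===== VERDICT (by name: the statement is the Claim_ definition above) =====
theorem abbreviate_sections_spec : Claim_equal_abbreviate_sections := by
  intro sections _
  unfold Spec_abbreviate_sections abbreviate_sections abbreviate_sections_alt
  by_cases h : sections = []
  · subst h; rfl
  · simp only [h, if_false]
    cases hs : PySem.List.sorted sections (fun x => x) false with
    | nil => exact absurd hs (pvSorted_ne_nil h)
    | cons s0 rest =>
      have hA := pvFoldA_eq_pvGA rest [] s0 s0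
      simp only [List.nil_append] at hA
      have hB := pvE_eq_pvGA rest s0 s0
      show PySem.Str.join ", " _ = PySem.Str.join ", " _
      rw [hA, ← hB]
      rfl
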